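-- pv_equiv track=rewrite | github.com/thom-heinrich/twinr | src/twinr/integrations/smarthome/query.py | _decode_json_pointer_segment
-- ===== SOURCE A (Python) =====
-- def _decode_json_pointer_segment(segment: str) -> str:
--     """Decode one RFC 6901 JSON Pointer segment."""
--
--     if "~" not in segment:
--         return segment
--     decoded: list[str] = []
--     index = 0
--     while index < len(segment):
--         character = segment[index]
--         if character != "~":
--             decoded.append(character)
--             index += 1
--             continue
--         if index + 1 >= len(segment):
--             raise ValueError("state filter key contains an invalid JSON Pointer escape.")
--         escaped = segment[index + 1]
--         if escaped == "0":
--             decoded.append("~")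
--         elif escaped == "1":
--             decoded.append("/")
--         else:
--             raise ValueError("state filter key contains an invalid JSON Pointer escape.")
--         index += 2
--     return "".join(decoded)
-- ===== SOURCE B (Python) =====
-- def _decode_json_pointer_segment(segment: str) -> str:
--     """Decode one RFC 6901 JSON Pointer segment."""
--
--     if "~" not in segment:
--         return segment
--     parts = segment.split("~")
--     pieces = []
--     for part in parts[1:]:
--         if not part or part[0] not in "01":
--             raise ValueError("state filter key contains an invalid JSON Pointer escape.")
--         pieces.append(("~" if part[0] == "0" else "/") + part[1:])
--     return parts[0] + "".join(pieces)
-- ===== Notes on version B (the rewrite author's own statement) =====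
-- stated objective: idiomatic
-- what changed: Replaces the index-driven character-by-character while loop with a split on '~' followed by per-part validation and joining, removing all manual index arithmetic; Pre_ excludes exactly the inputs on which both implementations raise ValueError (a '~' not followed by '0' or '1').
import Mathlib
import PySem

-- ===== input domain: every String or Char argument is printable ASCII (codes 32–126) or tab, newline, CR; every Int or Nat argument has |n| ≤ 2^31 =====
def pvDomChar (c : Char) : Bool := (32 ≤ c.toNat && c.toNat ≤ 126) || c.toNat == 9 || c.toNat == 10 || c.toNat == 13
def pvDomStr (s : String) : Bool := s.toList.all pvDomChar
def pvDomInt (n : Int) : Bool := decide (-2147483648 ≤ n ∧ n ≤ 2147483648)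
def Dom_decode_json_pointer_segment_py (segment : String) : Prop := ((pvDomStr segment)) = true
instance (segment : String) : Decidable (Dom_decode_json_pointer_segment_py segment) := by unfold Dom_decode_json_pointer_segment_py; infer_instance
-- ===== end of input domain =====

-- B decodes by splitting on '~' instead of A's index-driven while loop (idiomatic; same cost).
-- Both A and B raise ValueError (same message) on malformed escapes; those inputs are outside Pre_.

-- ===== PORT A =====
-- the while loop of A, as structural recursion over the remaining characters;
-- on Python's ValueError paths (excluded by Pre_) it returns [] as a placeholder.
def pvGoA : List Char → List Char
  | [] => []
  | c :: rest =>
    if c ≠ '~' then c :: pvGoA rest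
    else
      match rest with
      | [] => []                               -- raise ValueError (outside Pre_)
      | e :: rest' =>
        if e = '0' then '~' :: pvGoA rest'
        else if e = '1' then '/' :: pvGoA rest'
        else []                                -- raise ValueError (outside Pre_)

def decode_json_pointer_segment_py (segment : String) : String :=
  if PySem.Chars.isIn ['~'] segment.toList = false then segment
  else String.ofList (pvGoA segment.toList)

-- ===== PORT B =====
-- the loop body of B: decode one part of segment.split("~") after the first;
-- '~' or '/' prepended to part[1:]; [] is the placeholder for B's ValueError paths.
def pvDecodePart (part : List Char) : List Char :=
  match part with
  | [] => []                                   -- raise ValueError (outside Pre_)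
  | c :: cs =>
    if c = '0' then '~' :: cs
    else if c = '1' then '/' :: cs
    else []                                    -- raise ValueError (outside Pre_)

def decode_json_pointer_segment_py_alt (segment : String) : String :=
  if PySem.Chars.isIn ['~'] segment.toList = false then segment
  else
    match segment.toList.splitOn '~' with      -- segment.split("~"); never empty
    | [] => ""
    | p0 :: rest => String.ofList (p0 ++ rest.flatMap pvDecodePart)

-- ===== PRECONDITION & SPEC =====
-- Pre_ excludes exactly the inputs on which the Python A raises ValueError:
-- those containing a '~' not followed by '0' or '1' (B raises the same error there).
def Pre_decode_json_pointer_segment_py (segment : String) : Prop :=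
  ∀ i, i < segment.toList.length → segment.toList.getD i ' ' = '~' →
    (segment.toList.getD (i+1) ' ' = '0' ∨ segment.toList.getD (i+1) ' ' = '1')
instance (segment : String) : Decidable (Pre_decode_json_pointer_segment_py segment) := by
  unfold Pre_decode_json_pointer_segment_py; infer_instance

def pvWitness_decode_json_pointer_segment_py : String := "a~0b~1c"

def Spec_decode_json_pointer_segment_py (segment : String) (out : String) : Prop := out = decode_json_pointer_segment_py_alt segment
instance (segment : String) (out : String) : Decidable (Spec_decode_json_pointer_segment_py segment out) := by unfold Spec_decode_json_pointer_segment_py; infer_instance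

-- ===== CLAIM (what is proved, stated in full; the proofs are below) =====
def Claim_equal_decode_json_pointer_segment_py : Prop := ∀ (segment : String), Dom_decode_json_pointer_segment_py segment → Pre_decode_json_pointer_segment_py segment → Spec_decode_json_pointer_segment_py segment (decode_json_pointer_segment_py segment)

-- ===== LEMMAS AND PROOFS =====

-- the list-level precondition: every '~' is immediately followed by '0' or '1'
def pvPreL (l : List Char) : Prop :=
  ∀ i, i < l.length → l.getD i ' ' = '~' →
    (l.getD (i+1) ' ' = '0' ∨ l.getD (i+1) ' ' = '1')

lemma pvPreL_tail {c : Char} {l : List Char} (h : pvPreL (c :: l)) : pvPreL l := by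
  intro i hi hc
  have := h (i+1) (by simpa using Nat.succ_lt_succ hi) (by simpa using hc)
  simpa using this

-- what B's join computes on the split of l
def pvJoinSplit (l : List Char) : List Char :=
  match l.splitOn '~' with
  | [] => []
  | p0 :: rest => p0 ++ rest.flatMap pvDecodePart

lemma pvSplitOn_cons_ne {c : Char} (l : List Char) (hc : c ≠ '~') :
    (c :: l).splitOn '~' = (l.splitOn '~').modifyHead (List.cons c) := by
  simp [List.splitOn, List.splitOnP_cons, hc]

lemma pvSplitOn_cons_tilde (l : List Char) :
    ('~' :: l).splitOn '~' = [] :: l.splitOn '~' := by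
  simp [List.splitOn, List.splitOnP_cons]

lemma pvJoinSplit_cons_ne {c : Char} (l : List Char) (hc : c ≠ '~') :
    pvJoinSplit (c :: l) = c :: pvJoinSplit l := by
  unfold pvJoinSplit
  rw [pvSplitOn_cons_ne l hc]
  rcases h : l.splitOn '~' with _ | ⟨p0, rest⟩
  · exact absurd h (List.splitOnP_ne_nil _ l)
  · simp

lemma pvMainAux (n : Nat) : ∀ l : List Char, l.length ≤ n → pvPreL l → pvGoA l = pvJoinSplit l := by
  induction n with
  | zero =>
    intro l hlen _
    rw [List.length_eq_zero_iff.mp (Nat.le_zero.mp hlen)]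
    simp [pvGoA, pvJoinSplit, List.splitOn, List.splitOnP_nil]
  | succ n ih =>
    intro l hlen hpre
    rcases l with _ | ⟨c, rest⟩
    · simp [pvGoA, pvJoinSplit, List.splitOn, List.splitOnP_nil]
    · by_cases hc : c = '~'
      · subst hc
        have h0 := hpre 0 (by simp) (by simp)
        rcases rest with _ | ⟨e, rest'⟩
        · simp at h0
        · have hrec := ih rest' (by simp at hlen; omega)
            (pvPreL_tail (pvPreL_tail hpre))
          have he : e = '0' ∨ e = '1' := by simpa using h0
          have hne : e ≠ '~' := by rcases he with h | h <;> simp [h]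
          unfold pvJoinSplit
          rw [pvSplitOn_cons_tilde, pvSplitOn_cons_ne rest' hne]
          rcases hsp : rest'.splitOn '~' with _ | ⟨q0, qs⟩
          · exact absurd hsp (List.splitOnP_ne_nil _ rest')
          · rcases he with h | h <;>
              simp [pvGoA, h, pvDecodePart, hrec, pvJoinSplit, hsp]
      · have hrec := ih rest (by simp at hlen; omega) (pvPreL_tail hpre)
        rw [pvJoinSplit_cons_ne rest hc]
        rcases rest with _ | ⟨e2, r2⟩ <;> simp [pvGoA, hc, hrec, pvJoinSplit, List.splitOn, List.splitOnP_nil]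

lemma pvMain (l : List Char) (hpre : pvPreL l) : pvGoA l = pvJoinSplit l :=
  pvMainAux l.length l (Nat.le_refl _) hpre

-- ===== VERDICT (by name: the statement is the Claim_ definition above) =====
theorem decode_json_pointer_segment_py_spec : Claim_equal_decode_json_pointer_segment_py := by
  intro segment _ hpre
  unfold Spec_decode_json_pointer_segment_py
  unfold decode_json_pointer_segment_py decode_json_pointer_segment_py_alt
  by_cases h : PySem.Chars.isIn ['~'] segment.toList = false
  · rw [if_pos h, if_pos h]
  · rw [if_neg h, if_neg h]
    rw [pvMain segment.toList hpre]
    unfold pvJoinSplit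
    rcases hsp : segment.toList.splitOn '~' with _ | ⟨p0, rest⟩
    · exact absurd hsp (List.splitOnP_ne_nil _ _)
    · simp
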